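-- pv_equiv track=rewrite | github.com/wu-tian807/AIAssistantWeb | utils/text_attachment/embeddings.py | _determine_line_range
-- ===== SOURCE A (Python) =====
-- from typing import Dict, Any, List, Tuple
--
-- def _determine_line_range(text: str, lines: List[str], start_pos: int, end_pos: int, current_line: int) -> Tuple[int, int, int]:
--     """
--     确定文本块对应的行号范围
--
--     Args:
--         text: 完整文本
--         lines: 文本按行分割
--         start_pos: 块起始位置（字符索引）
--         end_pos: 块结束位置（字符索引）
--         current_line: 当前处理到的行号
--
--     Returns:
--         Tuple[int, int, int]: 起始行号，结束行号，下次处理的行号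
--     """
--     start_line = current_line
--     line_pos = 0
--
--     # 找到起始行
--     while start_line < len(lines):
--         line_length = len(lines[start_line]) + 1  # +1 for newline
--         if line_pos + line_length > start_pos:
--             break
--         line_pos += line_length
--         start_line += 1
--
--     # 找到结束行
--     end_line = start_line
--     while end_line < len(lines) and line_pos < end_pos:
--         line_length = len(lines[end_line]) + 1
--         line_pos += line_length
--         if line_pos >= end_pos:
--             break
--         end_line += 1
--
--     return start_line, min(end_line, len(lines) - 1), end_line
-- ===== SOURCE B (Python) =====
-- from typing import List, Tuple
--
-- def _bisect_right(a: List[int], x: int) -> int: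
--     lo, hi = 0, len(a)
--     while lo < hi:
--         mid = (lo + hi) // 2
--         if x < a[mid]:
--             hi = mid
--         else:
--             lo = mid + 1
--     return lo
--
-- def _bisect_left(a: List[int], x: int) -> int:
--     lo, hi = 0, len(a)
--     while lo < hi:
--         mid = (lo + hi) // 2
--         if a[mid] < x:
--             lo = mid + 1
--         else:
--             hi = mid
--     return lo
--
-- def _determine_line_range(text: str, lines: List[str], start_pos: int, end_pos: int, current_line: int) -> Tuple[int, int, int]:
--     n = len(lines)
--     # prefix offsets: offsets[k] = total length (+1 per newline) of lines[current_line:current_line+k]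
--     offsets = [0]
--     for i in range(current_line, n):
--         offsets.append(offsets[-1] + len(lines[i]) + 1)
--     m = len(offsets) - 1
--     k = max(_bisect_right(offsets, start_pos) - 1, 0)
--     start_line = current_line + k
--     if k < m and offsets[k] < end_pos:
--         end_line = current_line + min(_bisect_left(offsets, end_pos) - 1, m)
--     else:
--         end_line = start_line
--     return start_line, min(end_line, n - 1), end_line
-- ===== Notes on version B (the rewrite author's own statement) =====
-- stated objective: alternative
-- what changed: Replaces A's two sequential scans with shared running state by one prefix-offset array built once plus two hand-rolled binary searches (bisect_right for the start line, bisect_left for the end line) and closed-form clamping.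
import Mathlib
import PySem

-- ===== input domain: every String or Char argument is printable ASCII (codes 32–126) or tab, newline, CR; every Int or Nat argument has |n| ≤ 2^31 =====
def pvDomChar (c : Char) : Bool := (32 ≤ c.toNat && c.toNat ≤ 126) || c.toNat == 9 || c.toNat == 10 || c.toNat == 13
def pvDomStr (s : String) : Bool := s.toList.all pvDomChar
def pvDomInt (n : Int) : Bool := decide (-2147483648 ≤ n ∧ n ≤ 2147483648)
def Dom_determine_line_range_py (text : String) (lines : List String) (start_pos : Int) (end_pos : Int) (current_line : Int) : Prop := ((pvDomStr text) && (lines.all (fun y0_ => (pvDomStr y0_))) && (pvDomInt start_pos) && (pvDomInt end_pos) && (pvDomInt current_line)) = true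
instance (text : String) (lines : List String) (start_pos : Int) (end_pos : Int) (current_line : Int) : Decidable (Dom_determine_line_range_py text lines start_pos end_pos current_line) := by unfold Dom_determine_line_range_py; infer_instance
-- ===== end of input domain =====

-- B replaces A's two sequential scans by a prefix-offset array plus two hand-rolled binary
-- searches (alternative decomposition, same asymptotic cost; return value only, no mutation).

-- len(lines[i]) + 1 : out-of-range index defaults to 0, reachable only outside Pre_
def pvLen (lines : List String) (i : Int) : Int :=
  ((PySem.List.pyGet? lines i).map PySem.Str.len).getD 0 + 1

-- ===== PORT A =====
-- first while loop of A; fuel = len(lines) - start_line encodes 'while start_line < len(lines)'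
def pvFindStart (lines : List String) (start_pos : Int) : Nat → Int → Int → Int × Int
  | 0, sl, lp => (sl, lp)
  | f + 1, sl, lp =>
    if lp + pvLen lines sl > start_pos then (sl, lp)
    else pvFindStart lines start_pos f (sl + 1) (lp + pvLen lines sl)

-- second while loop of A; fuel encodes 'end_line < len(lines)', the if encodes 'line_pos < end_pos'
def pvFindEnd (lines : List String) (end_pos : Int) : Nat → Int → Int → Int
  | 0, el, _ => el
  | f + 1, el, lp =>
    if lp < end_pos then
      if lp + pvLen lines el ≥ end_pos then el
      else pvFindEnd lines end_pos f (el + 1) (lp + pvLen lines el)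
    else el

def determine_line_range_py (text : String) (lines : List String) (start_pos : Int) (end_pos : Int) (current_line : Int) : Int × Int × Int :=
  let n : Int := PySem.List.len lines
  let slp := pvFindStart lines start_pos (n - current_line).toNat current_line 0
  let end_line := pvFindEnd lines end_pos (n - slp.1).toNat slp.1 slp.2
  (slp.1, min end_line (n - 1), end_line)

-- ===== PORT B =====
-- hand-rolled bisect_right of Source B; mid = (lo+hi)//2 inlined; fuel = hi - lo bounds
-- the iteration count of the while loop (the interval shrinks by at least 1 per step)
def pvBisectRight (a : List Int) (x : Int) : Nat → Int → Int → Int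
  | 0, lo, _ => lo
  | f + 1, lo, hi =>
    if lo < hi then
      if x < (PySem.List.pyGet? a (PySem.Int.floordiv (lo + hi) 2)).getD 0 then
        pvBisectRight a x f lo (PySem.Int.floordiv (lo + hi) 2)
      else
        pvBisectRight a x f (PySem.Int.floordiv (lo + hi) 2 + 1) hi
    else lo

-- hand-rolled bisect_left of Source B
def pvBisectLeft (a : List Int) (x : Int) : Nat → Int → Int → Int
  | 0, lo, _ => lo
  | f + 1, lo, hi =>
    if lo < hi then
      if (PySem.List.pyGet? a (PySem.Int.floordiv (lo + hi) 2)).getD 0 < x then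
        pvBisectLeft a x f (PySem.Int.floordiv (lo + hi) 2 + 1) hi
      else
        pvBisectLeft a x f lo (PySem.Int.floordiv (lo + hi) 2)
    else lo

-- offsets = [0]; for i in range(current_line, n): offsets.append(offsets[-1] + len(lines[i]) + 1)
def pvBuildOffsets (lines : List String) (c n : Int) : List Int :=
  (PySem.List.pyRange c n 1).foldl
    (fun acc i => acc ++ [(PySem.List.pyGet? acc (-1)).getD 0 + pvLen lines i]) [0]

def determine_line_range_py_alt (text : String) (lines : List String) (start_pos : Int) (end_pos : Int) (current_line : Int) : Int × Int × Int :=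
  let n : Int := PySem.List.len lines
  let offsets := pvBuildOffsets lines current_line n
  let m : Int := PySem.List.len offsets - 1
  let k : Int := max (pvBisectRight offsets start_pos (PySem.List.len offsets).toNat 0 (PySem.List.len offsets) - 1) 0
  let start_line := current_line + k
  let end_line :=
    if k < m ∧ (PySem.List.pyGet? offsets k).getD 0 < end_pos then
      current_line + min (pvBisectLeft offsets end_pos (PySem.List.len offsets).toNat 0 (PySem.List.len offsets) - 1) m
    else start_line
  (start_line, min end_line (n - 1), end_line)

-- ===== PRECONDITION & SPEC =====
-- Pre_ excludes exactly the inputs on which the Python A raises IndexError: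
-- current_line < -len(lines) makes the first lines[start_line] access out of range.
def Pre_determine_line_range_py (text : String) (lines : List String) (start_pos : Int) (end_pos : Int) (current_line : Int) : Prop :=
  -(lines.length : Int) ≤ current_line
instance (text : String) (lines : List String) (start_pos : Int) (end_pos : Int) (current_line : Int) : Decidable (Pre_determine_line_range_py text lines start_pos end_pos current_line) := by unfold Pre_determine_line_range_py; infer_instance

def pvWitness_determine_line_range_py : String × List String × Int × Int × Int :=
  ("ab\nc", ["ab", "c"], 0, 3, 0)

def Spec_determine_line_range_py (text : String) (lines : List String) (start_pos : Int) (end_pos : Int) (current_line : Int) (out : Int × Int × Int) : Prop := out = determine_line_range_py_alt text lines start_pos end_pos current_line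
instance (text : String) (lines : List String) (start_pos : Int) (end_pos : Int) (current_line : Int) (out : Int × Int × Int) : Decidable (Spec_determine_line_range_py text lines start_pos end_pos current_line out) := by unfold Spec_determine_line_range_py; infer_instance

-- ===== CLAIM (what is proved, stated in full; the proofs are below) =====
def Claim_equal_determine_line_range_py : Prop := ∀ (text : String) (lines : List String) (start_pos : Int) (end_pos : Int) (current_line : Int), Dom_determine_line_range_py text lines start_pos end_pos current_line → Pre_determine_line_range_py text lines start_pos end_pos current_line → Spec_determine_line_range_py text lines start_pos end_pos current_line (determine_line_range_py text lines start_pos end_pos current_line)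

-- ===== LEMMAS AND PROOFS =====

-- midpoint bounds of (lo+hi)//2, used by the binary-search lemmas
theorem pvMid_bounds {lo hi : Int} (h : lo < hi) :
    lo ≤ PySem.Int.floordiv (lo + hi) 2 ∧ PySem.Int.floordiv (lo + hi) 2 < hi := by
  rw [PySem.Int.floordiv_eq_ediv_of_pos (by norm_num)]
  omega

-- cumulative offsets: pvOff j = length(+1 each) of lines[c], …, lines[c+j-1]
def pvOff (lines : List String) (c : Int) : Nat → Int
  | 0 => 0
  | j + 1 => pvOff lines c j + pvLen lines (c + (j : Int))

theorem pvLen_pos (lines : List String) (i : Int) : 1 ≤ pvLen lines i := by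
  unfold pvLen
  cases h : PySem.List.pyGet? lines i with
  | none => simp
  | some s => simp [PySem.Str.len_eq]

theorem pvOff_strictMono (lines : List String) (c : Int) : StrictMono (pvOff lines c) := by
  apply strictMono_nat_of_lt_succ
  intro j
  have := pvLen_pos lines (c + (j : Int))
  simp only [pvOff]
  omega

-- a downward-closed predicate on [0, M) is a prefix: it holds exactly below some cut t
theorem pvCut (q : Nat → Prop) [DecidablePred q] (hdc : ∀ i j : Nat, i ≤ j → q j → q i) :
    ∀ M : Nat, ∃ t, t ≤ M ∧ ∀ i, i < M → (q i ↔ i < t) := by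
  intro M
  induction M with
  | zero => exact ⟨0, Nat.le_refl 0, fun i hi => absurd hi (by omega)⟩
  | succ M ih =>
    obtain ⟨t, htM, hiff⟩ := ih
    by_cases hq : q M
    · refine ⟨M + 1, Nat.le_refl _, fun i hi => ?_⟩
      exact ⟨fun _ => by omega, fun _ => hdc i M (by omega) hq⟩
    · refine ⟨t, by omega, fun i hi => ?_⟩
      rcases Nat.lt_succ_iff_lt_or_eq.mp hi with h | h
      · exact hiff i h
      · subst h
        exact ⟨fun h' => absurd h' hq, fun h' => by omega⟩

theorem pvBuildOffsets_aux (lines : List String) (c : Int) (M : Nat) :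
    ((List.range M).map (fun k : Nat => c + (k : Int))).foldl
      (fun acc i => acc ++ [(PySem.List.pyGet? acc (-1)).getD 0 + pvLen lines i]) [0]
    = (List.range (M + 1)).map (pvOff lines c) := by
  induction M with
  | zero => simp [pvOff]
  | succ M ih =>
    rw [List.range_succ, List.map_append, List.foldl_append, ih]
    rw [List.range_succ (n := M + 1), List.map_append]
    simp only [List.map_cons, List.map_nil, List.foldl_cons, List.foldl_nil]
    rw [show (List.range (M + 1)).map (pvOff lines c)
          = (List.range M).map (pvOff lines c) ++ [pvOff lines c M] by
        rw [List.range_succ, List.map_append]; simp]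
    rw [PySem.List.pyGet?_neg_one_append_singleton]
    simp [pvOff]

theorem pvBuildOffsets_eq (lines : List String) (c n : Int) :
    pvBuildOffsets lines c n = (List.range ((n - c).toNat + 1)).map (pvOff lines c) := by
  unfold pvBuildOffsets
  rw [PySem.List.pyRange_one]
  exact pvBuildOffsets_aux lines c ((n - c).toNat)

theorem pvGet_offsets (off : Nat → Int) (M : Nat) (j : Nat) (hj : j < M + 1) :
    PySem.List.pyGet? ((List.range (M + 1)).map off) (j : Int) = some (off j) := by
  rw [PySem.List.pyGet?_natCast]
  simp [List.getElem?_range, hj]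

theorem pvBisectRight_eq (off : Nat → Int) (M : Nat) (x : Int) (t : Nat) (ht : t ≤ M + 1)
    (hiff : ∀ i : Nat, i < M + 1 → (off i ≤ x ↔ i < t)) :
    ∀ (fuel : Nat) (lo hi : Int), (hi - lo).toNat ≤ fuel → 0 ≤ lo → hi ≤ (M : Int) + 1 →
      lo ≤ (t : Int) → (t : Int) ≤ hi →
      pvBisectRight ((List.range (M + 1)).map off) x fuel lo hi = (t : Int) := by
  intro fuel
  induction fuel with
  | zero =>
    intro lo hi hf h0 hM hlt hth
    simp only [pvBisectRight]
    omega
  | succ fuel ih =>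
    intro lo hi hf h0 hM hlt hth
    simp only [pvBisectRight]
    by_cases h : lo < hi
    · simp only [h, if_true]
      have hmid := pvMid_bounds h
      set mid := PySem.Int.floordiv (lo + hi) 2 with hmiddef
      have hmM : mid.toNat < M + 1 := by omega
      have hcast : mid = ((mid.toNat : Nat) : Int) := by omega
      rw [hcast, pvGet_offsets off M mid.toNat hmM]
      simp only [Option.getD_some]
      by_cases hx : x < off mid.toNat
      · rw [if_pos hx]
        have h5 : ¬ mid.toNat < t := fun hc => absurd ((hiff _ hmM).mpr hc) (not_le.mpr hx)
        rw [← hcast]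
        exact ih lo mid (by omega) h0 (by omega) hlt (by omega)
      · rw [if_neg hx]
        have h5 : mid.toNat < t := (hiff _ hmM).mp (not_lt.mp hx)
        rw [← hcast]
        exact ih (mid + 1) hi (by omega) (by omega) hM (by omega) hth
    · rw [if_neg h]; omega

theorem pvBisectLeft_eq (off : Nat → Int) (M : Nat) (x : Int) (t : Nat) (ht : t ≤ M + 1)
    (hiff : ∀ i : Nat, i < M + 1 → (off i < x ↔ i < t)) :
    ∀ (fuel : Nat) (lo hi : Int), (hi - lo).toNat ≤ fuel → 0 ≤ lo → hi ≤ (M : Int) + 1 →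
      lo ≤ (t : Int) → (t : Int) ≤ hi →
      pvBisectLeft ((List.range (M + 1)).map off) x fuel lo hi = (t : Int) := by
  intro fuel
  induction fuel with
  | zero =>
    intro lo hi hf h0 hM hlt hth
    simp only [pvBisectLeft]
    omega
  | succ fuel ih =>
    intro lo hi hf h0 hM hlt hth
    simp only [pvBisectLeft]
    by_cases h : lo < hi
    · simp only [h, if_true]
      have hmid := pvMid_bounds h
      set mid := PySem.Int.floordiv (lo + hi) 2 with hmiddef
      have hmM : mid.toNat < M + 1 := by omega
      have hcast : mid = ((mid.toNat : Nat) : Int) := by omega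
      rw [hcast, pvGet_offsets off M mid.toNat hmM]
      simp only [Option.getD_some]
      by_cases hx : off mid.toNat < x
      · rw [if_pos hx]
        have h5 : mid.toNat < t := (hiff _ hmM).mp hx
        rw [← hcast]
        exact ih (mid + 1) hi (by omega) (by omega) hM (by omega) hth
      · rw [if_neg hx]
        have h5 : ¬ mid.toNat < t := fun hc => absurd ((hiff _ hmM).mpr hc) hx
        rw [← hcast]
        exact ih lo mid (by omega) h0 (by omega) hlt (by omega)
    · rw [if_neg h]; omega

theorem pvFindStart_eq (lines : List String) (c sp : Int) (m t : Nat) (ht : t ≤ m + 1)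
    (hiff : ∀ i : Nat, i < m + 1 → (pvOff lines c i ≤ sp ↔ i < t)) :
    ∀ (f j : Nat), j ≤ m → f = m - j → j ≤ t - 1 →
      pvFindStart lines sp f (c + (j : Int)) (pvOff lines c j)
        = (c + ((t - 1 : Nat) : Int), pvOff lines c (t - 1)) := by
  intro f
  induction f with
  | zero =>
    intro j hj hf hjk
    have hje : t - 1 = j := by omega
    rw [hje]
    simp [pvFindStart]
  | succ f ih =>
    intro j hj hf hjk
    have hjm : j < m := by omega
    have hsucc : pvOff lines c j + pvLen lines (c + (j : Int)) = pvOff lines c (j + 1) := by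
      simp [pvOff]
    rw [pvFindStart, hsucc]
    by_cases hb : pvOff lines c (j + 1) > sp
    · rw [if_pos hb]
      have h1 : ¬ (j + 1 < t) := fun hc => absurd ((hiff (j + 1) (by omega)).mpr hc) (not_le.mpr hb)
      have hje : t - 1 = j := by omega
      rw [hje]
    · rw [if_neg hb]
      have h2 : j + 1 < t := (hiff (j + 1) (by omega)).mp (not_lt.mp hb)
      have := ih (j + 1) (by omega) (by omega) (by omega)
      rw [← this]
      congr 1 <;> push_cast <;> ring

theorem pvFindEnd_eq (lines : List String) (c ep : Int) (m t' E : Nat) (ht' : t' ≤ m + 1)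
    (hiff : ∀ i : Nat, i < m + 1 → (pvOff lines c i < ep ↔ i < t'))
    (hE : E = min (t' - 1) m) :
    ∀ (f j : Nat), j ≤ E → f = m - j → pvOff lines c j < ep →
      pvFindEnd lines ep f (c + (j : Int)) (pvOff lines c j) = c + (E : Int) := by
  intro f
  induction f with
  | zero =>
    intro j hj hf hlt
    have hje : E = j := by omega
    rw [hje]
    simp [pvFindEnd]
  | succ f ih =>
    intro j hj hf hlt
    have hjm : j < m := by omega
    have hsucc : pvOff lines c j + pvLen lines (c + (j : Int)) = pvOff lines c (j + 1) := by
      simp [pvOff]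
    rw [pvFindEnd, if_pos hlt, hsucc]
    by_cases hb : pvOff lines c (j + 1) ≥ ep
    · rw [if_pos hb]
      have h1 : ¬ (j + 1 < t') := fun hc => absurd ((hiff (j + 1) (by omega)).mpr hc) (not_lt.mpr hb)
      have hje : E = j := by omega
      rw [hje]
    · rw [if_neg hb]
      have h2 : j + 1 < t' := (hiff (j + 1) (by omega)).mp (lt_of_not_ge hb)
      have := ih (j + 1) (by omega) (by omega) (by rw [← hsucc]; omega)
      rw [← this]
      congr 1
      push_cast
      ring

theorem pv_main (text : String) (lines : List String) (sp ep c : Int) :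
    determine_line_range_py text lines sp ep c = determine_line_range_py_alt text lines sp ep c := by
  have hmono := pvOff_strictMono lines c
  set n : Int := (lines.length : Int) with hn
  set m : Nat := (n - c).toNat with hmdef
  obtain ⟨t, ht, hiff⟩ := pvCut (fun i => pvOff lines c i ≤ sp)
    (fun i j hij hj => le_trans (hmono.monotone hij) hj) (m + 1)
  obtain ⟨t', ht', hiff'⟩ := pvCut (fun i => pvOff lines c i < ep)
    (fun i j hij hj => lt_of_le_of_lt (hmono.monotone hij) hj) (m + 1)
  set k : Nat := t - 1 with hk
  have hkm : k ≤ m := by omega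
  have hFS : pvFindStart lines sp m c 0 = (c + (k : Int), pvOff lines c k) := by
    have := pvFindStart_eq lines c sp m t ht hiff m 0 (by omega) (by omega) (by omega)
    simpa [pvOff] using this
  have hoff : pvBuildOffsets lines c n = (List.range (m + 1)).map (pvOff lines c) := by
    rw [pvBuildOffsets_eq, ← hmdef]
  have hBR : pvBisectRight ((List.range (m + 1)).map (pvOff lines c)) sp (m + 1) 0 (((m + 1 : Nat)) : Int) = (t : Int) :=
    pvBisectRight_eq (pvOff lines c) m sp t ht hiff (m + 1) 0 _ (by omega) (by omega) (by push_cast; omega) (by omega) (by push_cast; omega)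
  have hBL : pvBisectLeft ((List.range (m + 1)).map (pvOff lines c)) ep (m + 1) 0 (((m + 1 : Nat)) : Int) = (t' : Int) :=
    pvBisectLeft_eq (pvOff lines c) m ep t' ht' hiff' (m + 1) 0 _ (by omega) (by omega) (by push_cast; omega) (by omega) (by push_cast; omega)
  simp only [determine_line_range_py, determine_line_range_py_alt, PySem.List.len_eq, ← hn]
  rw [← hmdef, hFS, hoff]
  simp only [List.length_map, List.length_range, Int.toNat_natCast]
  rw [hBR, hBL]
  have hkint : max ((t : Int) - 1) 0 = (k : Int) := by omega
  rw [hkint]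
  have hgetk : (PySem.List.pyGet? ((List.range (m + 1)).map (pvOff lines c)) (k : Int)).getD 0
      = pvOff lines c k := by
    rw [pvGet_offsets (pvOff lines c) m k (by omega)]
    rfl
  rw [hgetk]
  have hfuel2 : (n - (c + (k : Int))).toNat = m - k := by omega
  rw [hfuel2]
  by_cases hg : k < m ∧ pvOff lines c k < ep
  · have hkt' : k < t' := (hiff' k (by omega)).mp hg.2
    set E : Nat := min (t' - 1) m with hE
    have hFE : pvFindEnd lines ep (m - k) (c + (k : Int)) (pvOff lines c k) = c + (E : Int) :=
      pvFindEnd_eq lines c ep m t' E ht' hiff' hE (m - k) k (by omega) rfl hg.2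
    rw [hFE, if_pos (by push_cast; omega : (k : Int) < (((m + 1 : Nat) : Int)) - 1 ∧ pvOff lines c k < ep)]
    have : min ((t' : Int) - 1) (((m + 1 : Nat) : Int) - 1) = (E : Int) := by push_cast; omega
    rw [this]
  · rw [if_neg (by push_cast at hg ⊢; omega)]
    have hA : pvFindEnd lines ep (m - k) (c + (k : Int)) (pvOff lines c k) = c + (k : Int) := by
      rcases Nat.eq_or_lt_of_le hkm with he | hlt
      · rw [he]; simp [pvFindEnd]
      · have hnl : ¬ pvOff lines c k < ep := fun hc => hg ⟨hlt, hc⟩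
        obtain ⟨f, hf⟩ : ∃ f, m - k = f + 1 := ⟨m - k - 1, by omega⟩
        rw [hf, pvFindEnd, if_neg hnl]
    rw [hA]

-- ===== VERDICT (by name: the statement is the Claim_ definition above) =====
theorem determine_line_range_py_spec : Claim_equal_determine_line_range_py := by
  intro text lines sp ep c _ _
  unfold Spec_determine_line_range_py
  exact pv_main text lines sp ep c
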